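-- pv_equiv track=rewrite | github.com/Fennec-coder/Session-bot | tools.py | from_text_to_array_schedule
-- ===== SOURCE A (Python) =====
-- def from_text_to_array_schedule(message):
--     answer = []
--     temp = ''
--     temp_d = []
--     temp_w = []
--     number_of_blank_lines = 0
--
--     for i in message:
--         if i == '\n':
--
--             if i == "'":
--                 i = "’"
--
--             number_of_blank_lines = number_of_blank_lines + 1
--             if number_of_blank_lines == 1:  # следущее занятие
--                 temp_d.append(temp)
--                 temp = ''
--             if number_of_blank_lines == 2:  # следущий день
--                 temp_w.append(temp_d)
--                 temp_d = []
--             if number_of_blank_lines == 3:  # следущая неделя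
--                 answer.append(temp_w)
--                 temp_w = []
--         else:
--             temp = temp + i
--             number_of_blank_lines = 0
--
--     n = 0
--     while n < 2:
--         if not answer:
--             answer.append([])
--             answer.append([])
--
--         if len(answer) < 2:
--             answer.append([])
--
--         missing = 7 - len(answer[n])
--         for j in range(missing):
--             answer[n].append([' '])
--         n += 1
--
--     return answer
-- ===== SOURCE B (Python) =====
-- def from_text_to_array_schedule(message):
--     # One pass over the lines of message.split('\n') instead of a character loop.
--     # Every segment except the last is followed by a newline in the original text,
--     # so the final (unterminated) segment is dropped, exactly as A drops pending text.
--     segments = message.split('\n')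
--     answer, week, day = [], [], []
--     blanks = 0
--     for seg in segments[:-1]:
--         blanks = (blanks if seg == '' else 0) + 1
--         if blanks == 1:
--             day = day + [seg]
--         elif blanks == 2:
--             week = week + [day]
--             day = []
--         elif blanks == 3:
--             answer = answer + [week]
--             week = []
--     while len(answer) < 2:
--         answer = answer + [[]]
--     return [w + [[' ']] * (7 - len(w)) for w in answer[:2]] + answer[2:]
-- ===== Notes on version B (the rewrite author's own statement) =====
-- stated objective: faster
-- what changed: B replaces A's character-by-character scan with repeated string concatenation temp = temp + i by a single split('\n') and one fold over the line segments (the last, unterminated segment dropped), and replaces A's two-iteration mutating padding loop by take/map/concat; the unreachable apostrophe-rewriting branch is gone.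
import Mathlib
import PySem

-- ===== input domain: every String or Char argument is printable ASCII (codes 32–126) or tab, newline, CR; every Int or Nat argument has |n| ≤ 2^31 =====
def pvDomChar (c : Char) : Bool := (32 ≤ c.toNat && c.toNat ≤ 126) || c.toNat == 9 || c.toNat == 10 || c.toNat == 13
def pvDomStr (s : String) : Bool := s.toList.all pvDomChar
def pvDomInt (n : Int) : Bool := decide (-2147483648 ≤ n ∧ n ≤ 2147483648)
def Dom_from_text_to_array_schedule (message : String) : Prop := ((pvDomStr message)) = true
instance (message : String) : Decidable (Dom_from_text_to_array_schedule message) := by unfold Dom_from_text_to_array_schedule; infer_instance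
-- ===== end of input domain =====

-- B parses the schedule by one split('\n') and a fold over the resulting segments instead of
-- A's character-by-character scan; return values are identical on every input (A is total).

-- ===== PORT A =====
-- the loop body of A; strings are handled as their character lists (temp + i → temp ++ [i], exact)
def pvAstep (st : List (List (List String)) × List Char × List String × List (List String) × Nat)
    (i : Char) : List (List (List String)) × List Char × List String × List (List String) × Nat :=
  match st with
  | (answer, temp, temp_d, temp_w, nb) =>
    if i = '\n' then
      -- A's `if i == "'": i = "’"` : i is '\n' here, the rebinding is dead; kept literally, unused
      let _i := if i = '\'' then '’' else i
      let nb := nb + 1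
      let (temp_d, temp) := if nb = 1 then (temp_d ++ [String.ofList temp], ([] : List Char)) else (temp_d, temp)
      let (temp_w, temp_d) := if nb = 2 then (temp_w ++ [temp_d], ([] : List String)) else (temp_w, temp_d)
      let (answer, temp_w) := if nb = 3 then (answer ++ [temp_w], ([] : List (List String))) else (answer, temp_w)
      (answer, temp, temp_d, temp_w, nb)
    else
      (answer, temp ++ [i], temp_d, temp_w, 0)

-- one iteration (index n) of A's trailing `while n < 2` padding loop
def pvPadWeek (answer : List (List (List String))) (n : Nat) : List (List (List String)) :=
  let answer := if answer = [] then answer ++ [[], []] else answer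
  let answer := if answer.length < 2 then answer ++ [[]] else answer
  -- range(7 - len) in Python is empty when len ≥ 7: Nat subtraction is exact here
  let missing := 7 - (answer.getD n []).length
  answer.modify n (fun w => w ++ List.replicate missing [" "])

def from_text_to_array_schedule (message : String) : List (List (List String)) :=
  -- the trailing while loop runs exactly twice, n = 0 and n = 1
  pvPadWeek (pvPadWeek (message.toList.foldl pvAstep ([], [], [], [], 0)).1 0) 1

-- ===== PORT B =====
-- the loop body of B; segments are character lists (message.split('\n') via PySem.Chars.splitOn, exact)
def pvBstep (st : List (List (List String)) × List (List String) × List String × Nat)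
    (seg : List Char) : List (List (List String)) × List (List String) × List String × Nat :=
  match st with
  | (answer, week, day, blanks) =>
    let blanks := (if seg = [] then blanks else 0) + 1
    if blanks = 1 then (answer, week, day ++ [String.ofList seg], blanks)
    else if blanks = 2 then (answer, week ++ [day], [], blanks)
    else if blanks = 3 then (answer ++ [week], [], day, blanks)
    else (answer, week, day, blanks)

def pvFinish (answer : List (List (List String))) : List (List (List String)) :=
  (answer.take 2).map (fun w => w ++ List.replicate (7 - w.length) [" "]) ++ answer.drop 2

-- B's `while len(answer) < 2: answer = answer + [[]]`
def pvEnsure2 (answer : List (List (List String))) : List (List (List String)) :=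
  if answer.length < 2 then pvEnsure2 (answer ++ [[]]) else answer
termination_by 2 - answer.length
decreasing_by simp_all; omega

def from_text_to_array_schedule_alt (message : String) : List (List (List String)) :=
  -- segments = message.split('\n'); fold over segments[:-1]; then the padding comprehension
  pvFinish (pvEnsure2 (((PySem.Chars.splitOn message.toList ['\n']).dropLast.foldl
    pvBstep ([], [], [], 0)).1))

-- the final `[w + [[' ']] * (7 - len(w)) for w in answer[:2]] + answer[2:]`


-- ===== PRECONDITION & SPEC =====
def Spec_from_text_to_array_schedule (message : String) (out : List (List (List String))) : Prop := out = from_text_to_array_schedule_alt message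
instance (message : String) (out : List (List (List String))) : Decidable (Spec_from_text_to_array_schedule message out) := by unfold Spec_from_text_to_array_schedule; infer_instance

-- ===== CLAIM (what is proved, stated in full; the proofs are below) =====
def Claim_equal_from_text_to_array_schedule : Prop := ∀ (message : String), Dom_from_text_to_array_schedule message → Spec_from_text_to_array_schedule message (from_text_to_array_schedule message)

-- ===== LEMMAS AND PROOFS =====

-- structural recursion equivalent of Python's s.split('\n')
def pvSplit : List Char → List (List Char)
  | [] => [[]]
  | c :: cs =>
    if c = '\n' then [] :: pvSplit cs
    else (c :: (pvSplit cs).headI) :: (pvSplit cs).tail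

-- prepend a pending prefix to the first segment
def pvConsFirst (t : List Char) : List (List Char) → List (List Char)
  | [] => []
  | h :: r => (t ++ h) :: r

lemma pvSplit_ne_nil (cs : List Char) : pvSplit cs ≠ [] := by
  cases cs with
  | nil => simp [pvSplit]
  | cons c cs => by_cases h : c = '\n' <;> simp [pvSplit, h]

lemma pvSplitOn_go (cs : List Char) : ∀ (fuel : Nat) (cur : List Char) (acc : List (List Char)),
    cs.length < fuel →
    PySem.Chars.splitOn.go ['\n'] fuel cs cur acc =
      acc.reverse ++ pvConsFirst cur.reverse (pvSplit cs) := by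
  induction cs with
  | nil =>
    intro fuel cur acc h
    match fuel with
    | fuel + 1 => simp [PySem.Chars.splitOn.go, pvSplit, pvConsFirst]
  | cons c cs ih =>
    intro fuel cur acc h
    match fuel with
    | fuel + 1 =>
      by_cases hc : c = '\n'
      · subst hc
        have hpre : List.isPrefixOf ['\n'] ('\n' :: cs) = true := by
          simp [List.isPrefixOf]
        rw [PySem.Chars.splitOn.go]
        simp only [hpre, if_pos]
        have hdrop : List.drop (['\n'].length) ('\n' :: cs) = cs := by simp
        rw [hdrop, ih fuel [] (cur.reverse :: acc) (by simpa using Nat.lt_of_succ_lt_succ h)]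
        obtain ⟨h0, r, hr⟩ : ∃ h0 r, pvSplit cs = h0 :: r := by
          cases hs : pvSplit cs with
          | nil => exact absurd hs (pvSplit_ne_nil cs)
          | cons a b => exact ⟨a, b, rfl⟩
        simp [pvSplit, pvConsFirst, hr]
      · have hpre : List.isPrefixOf ['\n'] (c :: cs) = false := by
          simp [List.isPrefixOf]
          intro hcon; exact hc hcon.symm
        rw [PySem.Chars.splitOn.go]
        simp only [hpre]
        rw [if_neg (by simp)]
        rw [ih fuel (c :: cur) acc (by simpa using Nat.lt_of_succ_lt_succ h)]
        obtain ⟨h0, r, hr⟩ : ∃ h0 r, pvSplit cs = h0 :: r := by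
          cases hs : pvSplit cs with
          | nil => exact absurd hs (pvSplit_ne_nil cs)
          | cons a b => exact ⟨a, b, rfl⟩
        simp [pvSplit, pvConsFirst, hr, hc]

lemma pvConsFirst_nil (l : List (List Char)) : pvConsFirst [] l = l := by
  cases l <;> simp [pvConsFirst]

lemma pvSplitOn_eq (cs : List Char) :
    PySem.Chars.splitOn cs ['\n'] = pvSplit cs := by
  have h := pvSplitOn_go cs (cs.length + 1) [] [] (by omega)
  simpa [PySem.Chars.splitOn, pvConsFirst_nil] using h

-- B's counter is irrelevant to the answer component when the first folded segment is nonempty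
lemma pvBlanks_irrel (l : List (List Char)) (ans : List (List (List String)))
    (week : List (List String)) (day : List String) (b1 b2 : Nat)
    (hl : ∀ s ∈ l.head?, s ≠ ([] : List Char)) :
    (List.foldl pvBstep (ans, week, day, b1) l).1 =
      (List.foldl pvBstep (ans, week, day, b2) l).1 := by
  cases l with
  | nil => rfl
  | cons s rest =>
    have hs : s ≠ ([] : List Char) := hl s (by simp)
    simp only [List.foldl_cons]
    have e1 : pvBstep (ans, week, day, b1) s = (ans, week, day ++ [String.ofList s], 1) := by
      simp [pvBstep, hs]
    have e2 : pvBstep (ans, week, day, b2) s = (ans, week, day ++ [String.ofList s], 1) := by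
      simp [pvBstep, hs]
    rw [e1, e2]

-- the heart of the proof: A's character fold equals B's segment fold,
-- with the pending text t prepended to the first segment
lemma pvFoldKey (cs : List Char) : ∀ (ans : List (List (List String)))
    (week : List (List String)) (day : List String) (nb : Nat) (t : List Char),
    (nb = 0 ∨ t = []) →
    (List.foldl pvAstep (ans, t, day, week, nb) cs).1 =
      (List.foldl pvBstep (ans, week, day, nb) ((pvConsFirst t (pvSplit cs)).dropLast)).1 := by
  induction cs with
  | nil =>
    intro ans week day nb t _
    simp [pvSplit, pvConsFirst]
  | cons c cs ih =>
    intro ans week day nb t hinv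
    by_cases hc : c = '\n'
    · subst hc
      have hsp : pvConsFirst t (pvSplit ('\n' :: cs)) = t :: pvSplit cs := by
        simp [pvSplit, pvConsFirst]
      rw [hsp]
      have hdl : (t :: pvSplit cs).dropLast = t :: (pvSplit cs).dropLast := by
        cases hs : pvSplit cs with
        | nil => exact absurd hs (pvSplit_ne_nil cs)
        | cons a b => simp
      rw [hdl]
      simp only [List.foldl_cons]
      -- case on the new counter value
      match nb with
      | 0 =>
        have hA : pvAstep (ans, t, day, week, 0) '\n' =
            (ans, [], day ++ [String.ofList t], week, 1) := by
          simp [pvAstep]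
        have hB : pvBstep (ans, week, day, 0) t =
            (ans, week, day ++ [String.ofList t], 1) := by
          simp [pvBstep]
        rw [hA, hB]
        simpa [pvConsFirst_nil] using ih ans week (day ++ [String.ofList t]) 1 [] (Or.inr rfl)
      | 1 =>
        have ht : t = [] := hinv.resolve_left (by omega)
        subst ht
        have hA : pvAstep (ans, [], day, week, 1) '\n' = (ans, [], [], week ++ [day], 2) := by
          simp [pvAstep]
        have hB : pvBstep (ans, week, day, 1) ([] : List Char) = (ans, week ++ [day], [], 2) := by
          simp [pvBstep]
        rw [hA, hB]
        simpa [pvConsFirst_nil] using ih ans (week ++ [day]) [] 2 [] (Or.inr rfl)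
      | 2 =>
        have ht : t = [] := hinv.resolve_left (by omega)
        subst ht
        have hA : pvAstep (ans, [], day, week, 2) '\n' = (ans ++ [week], [], day, [], 3) := by
          simp [pvAstep]
        have hB : pvBstep (ans, week, day, 2) ([] : List Char) = (ans ++ [week], [], day, 3) := by
          simp [pvBstep]
        rw [hA, hB]
        simpa [pvConsFirst_nil] using ih (ans ++ [week]) [] day 3 [] (Or.inr rfl)
      | (m + 3) =>
        have ht : t = [] := hinv.resolve_left (by omega)
        subst ht
        have hA : pvAstep (ans, [], day, week, m + 3) '\n' = (ans, [], day, week, m + 4) := by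
          simp [pvAstep]
        have hB : pvBstep (ans, week, day, m + 3) ([] : List Char) = (ans, week, day, m + 4) := by
          simp [pvBstep]
        rw [hA, hB]
        simpa [pvConsFirst_nil] using ih ans week day (m + 4) [] (Or.inr rfl)
    · obtain ⟨h0, r, hr⟩ : ∃ h0 r, pvSplit cs = h0 :: r := by
        cases hs : pvSplit cs with
        | nil => exact absurd hs (pvSplit_ne_nil cs)
        | cons a b => exact ⟨a, b, rfl⟩
      have hsp : pvConsFirst t (pvSplit (c :: cs)) =
          pvConsFirst (t ++ [c]) (pvSplit cs) := by
        simp [pvSplit, pvConsFirst, hc, hr]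
      rw [hsp]
      simp only [List.foldl_cons]
      have hA : pvAstep (ans, t, day, week, nb) c = (ans, t ++ [c], day, week, 0) := by
        simp [pvAstep, hc]
      rw [hA]
      rw [ih ans week day 0 (t ++ [c]) (Or.inl rfl)]
      apply pvBlanks_irrel
      intro s hsmem
      rcases r with _ | ⟨r0, rr⟩
      · simp [pvConsFirst, hr] at hsmem
      · simp [pvConsFirst, hr] at hsmem
        subst hsmem
        simp

-- pad w to seven entries
lemma pvPad_eq (ans : List (List (List String))) :
    pvPadWeek (pvPadWeek ans 0) 1 =
      pvFinish (pvEnsure2 ans) := by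
  match ans with
  | [] =>
    rw [pvEnsure2]; rw [pvEnsure2]; rw [pvEnsure2]
    simp [pvPadWeek, pvFinish, List.modify]
  | [a] =>
    rw [pvEnsure2]; rw [pvEnsure2]; rw [pvEnsure2]
    simp [pvPadWeek, pvFinish, List.modify]
  | a :: b :: rest =>
    rw [pvEnsure2]
    simp [pvPadWeek, pvFinish, List.modify]

-- ===== VERDICT (by name: the statement is the Claim_ definition above) =====
theorem from_text_to_array_schedule_spec : Claim_equal_from_text_to_array_schedule := by
  intro message _
  unfold Spec_from_text_to_array_schedule
  unfold from_text_to_array_schedule from_text_to_array_schedule_alt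
  rw [pvSplitOn_eq]
  have hkey := pvFoldKey message.toList [] [] [] 0 [] (Or.inl rfl)
  rw [pvConsFirst_nil] at hkey
  rw [hkey]
  exact pvPad_eq _
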